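-- pv_equiv track=rewrite | github.com/cynic-1/Action_Recognition | python/demo/ball_predict_x.py | get_new_turning_point
-- ===== SOURCE A (Python) =====
-- def get_new_turning_point(vp):
--     extrema = []
--     const_range = 10
--     for i in range(1, len(vp) - 1):
--         if vp[i][0] > vp[i - 1][0] and vp[i][0] > vp[i + 1][0]:
--             is_local_max = True
--             for j in range(max(0, i-const_range), min(len(vp), i+const_range)):
--                 if vp[j][0] > vp[i][0]:
--                     is_local_max = False
--
--             if is_local_max:
--                 extrema.append(i)
--
--         elif vp[i][0] < vp[i - 1][0] and vp[i][0] < vp[i + 1][0]: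
--             is_local_min = True
--             for j in range(max(0, i - const_range), min(len(vp), i + const_range)):
--                 if vp[j][0] < vp[i][0]:
--                     is_local_min = False
--
--             if is_local_min:
--                 extrema.append(i)
--
--     return extrema
-- ===== SOURCE B (Python) =====
-- def get_new_turning_point(vp):
--     n = len(vp)
--     xs = [p[0] for p in vp]
--     not_max = set()
--     not_min = set()
--     for j in range(n):
--         x = xs[j]
--         for i in range(max(1, j - 9), min(n - 1, j + 11)):
--             if x > xs[i]:
--                 not_max.add(i)
--             elif x < xs[i]:
--                 not_min.add(i)
--     out = []
--     for i in range(1, n - 1):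
--         if xs[i] > xs[i - 1] and xs[i] > xs[i + 1] and i not in not_max:
--             out.append(i)
--         elif xs[i] < xs[i - 1] and xs[i] < xs[i + 1] and i not in not_min:
--             out.append(i)
--     return out
-- ===== Notes on version B (the rewrite author's own statement) =====
-- stated objective: alternative
-- what changed: Inverts the traversal: instead of gathering each candidate's window and scanning it for a larger/smaller value, B makes one scatter pass in which every position j vetoes (adds to a not_max/not_min set) the candidate indices whose window contains j, then a second pass emits the neighbour-strict candidates not vetoed.
import Mathlib
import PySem

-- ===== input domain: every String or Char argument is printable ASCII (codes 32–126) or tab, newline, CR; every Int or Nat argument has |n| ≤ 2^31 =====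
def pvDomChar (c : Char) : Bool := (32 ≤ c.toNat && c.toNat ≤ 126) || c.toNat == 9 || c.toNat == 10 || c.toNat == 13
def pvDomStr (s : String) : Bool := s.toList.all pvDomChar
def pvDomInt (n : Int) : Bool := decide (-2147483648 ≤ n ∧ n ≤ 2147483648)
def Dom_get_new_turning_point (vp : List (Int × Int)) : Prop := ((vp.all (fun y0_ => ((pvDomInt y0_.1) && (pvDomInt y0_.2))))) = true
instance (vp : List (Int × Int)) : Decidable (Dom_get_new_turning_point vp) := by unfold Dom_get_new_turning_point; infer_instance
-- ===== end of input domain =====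

-- B inverts A's traversal: instead of scanning each candidate's window (gather),
-- a single pass over all positions lets each value veto the candidates whose
-- window contains it, recorded in two sets; a second pass emits the survivors
-- (objective: alternative decomposition, same asymptotic cost).

-- ===== PORT A =====
def get_new_turning_point (vp : List (Int × Int)) : List Int :=
  (PySem.List.pyRange 1 ((vp.length : Int) - 1) 1).foldl
    (fun extrema i =>
      if (PySem.List.pyGetD vp i (0,0)).1 > (PySem.List.pyGetD vp (i-1) (0,0)).1 ∧
         (PySem.List.pyGetD vp i (0,0)).1 > (PySem.List.pyGetD vp (i+1) (0,0)).1 then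
        let is_local_max :=
          (PySem.List.pyRange (max 0 (i-10)) (min (vp.length : Int) (i+10)) 1).foldl
            (fun b j =>
              if (PySem.List.pyGetD vp j (0,0)).1 > (PySem.List.pyGetD vp i (0,0)).1 then false else b)
            true
        if is_local_max then extrema ++ [i] else extrema
      else if (PySem.List.pyGetD vp i (0,0)).1 < (PySem.List.pyGetD vp (i-1) (0,0)).1 ∧
              (PySem.List.pyGetD vp i (0,0)).1 < (PySem.List.pyGetD vp (i+1) (0,0)).1 then
        let is_local_min :=
          (PySem.List.pyRange (max 0 (i-10)) (min (vp.length : Int) (i+10)) 1).foldl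
            (fun b j =>
              if (PySem.List.pyGetD vp j (0,0)).1 < (PySem.List.pyGetD vp i (0,0)).1 then false else b)
            true
        if is_local_min then extrema ++ [i] else extrema
      else extrema)
    []

-- ===== PORT B =====
-- body of the inner veto loop (x = xs[j])
def pvStepB (xs : List Int) (x : Int) (st : PySem.Set Int × PySem.Set Int) (i : Int) :
    PySem.Set Int × PySem.Set Int :=
  if x > PySem.List.pyGetD xs i 0 then (PySem.Set.add st.1 i, st.2)
  else if x < PySem.List.pyGetD xs i 0 then (st.1, PySem.Set.add st.2 i)
  else st

-- one iteration of the outer veto pass: position j vetoes candidates in its reach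
def pvInnerB (xs : List Int) (n : Int) (st : PySem.Set Int × PySem.Set Int) (j : Int) :
    PySem.Set Int × PySem.Set Int :=
  (PySem.List.pyRange (max 1 (j - 9)) (min (n - 1) (j + 11)) 1).foldl
    (pvStepB xs (PySem.List.pyGetD xs j 0)) st

def get_new_turning_point_alt (vp : List (Int × Int)) : List Int :=
  let n : Int := vp.length
  let xs := vp.map Prod.fst
  let tables := (PySem.List.pyRange 0 n 1).foldl (pvInnerB xs n) (PySem.Set.empty, PySem.Set.empty)
  (PySem.List.pyRange 1 (n - 1) 1).foldl
    (fun out i =>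
      if PySem.List.pyGetD xs i 0 > PySem.List.pyGetD xs (i-1) 0 ∧
         PySem.List.pyGetD xs i 0 > PySem.List.pyGetD xs (i+1) 0 ∧ ¬ i ∈ tables.1 then
        out ++ [i]
      else if PySem.List.pyGetD xs i 0 < PySem.List.pyGetD xs (i-1) 0 ∧
              PySem.List.pyGetD xs i 0 < PySem.List.pyGetD xs (i+1) 0 ∧ ¬ i ∈ tables.2 then
        out ++ [i]
      else out)
    []

-- ===== PRECONDITION & SPEC =====
def Spec_get_new_turning_point (vp : List (Int × Int)) (out : List Int) : Prop := out = get_new_turning_point_alt vp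
instance (vp : List (Int × Int)) (out : List Int) : Decidable (Spec_get_new_turning_point vp out) := by unfold Spec_get_new_turning_point; infer_instance

-- ===== CLAIM =====
def Claim_equal_get_new_turning_point : Prop := ∀ (vp : List (Int × Int)), Dom_get_new_turning_point vp → Spec_get_new_turning_point vp (get_new_turning_point vp)

-- ===== LEMMAS AND PROOFS =====

lemma fst_pyGetD (vp : List (Int × Int)) (j : Int) :
    (PySem.List.pyGetD vp j (0,0)).1 = PySem.List.pyGetD (vp.map Prod.fst) j 0 :=
  (PySem.List.pyGetD_map Prod.fst vp j (0,0)).symm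

-- A's flag loop: the flag stays true iff no element of the scanned range vetoes
lemma foldl_veto {α : Type} (p : α → Prop) [DecidablePred p] (L : List α) :
    ∀ b, L.foldl (fun b j => if p j then false else b) b
      = (b && L.all (fun j => decide (¬ p j))) := by
  induction L with
  | nil => intro b; simp
  | cons a t ih =>
    intro b
    rw [List.foldl_cons, ih]
    by_cases h : p a <;> simp [h]

-- membership after the inner veto loop
lemma mem_inner (xs : List Int) (x : Int) (L : List Int) :
    ∀ (st : PySem.Set Int × PySem.Set Int) (a : Int),
      (a ∈ (L.foldl (pvStepB xs x) st).1 ↔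
        a ∈ st.1 ∨ (a ∈ L ∧ x > PySem.List.pyGetD xs a 0)) ∧
      (a ∈ (L.foldl (pvStepB xs x) st).2 ↔
        a ∈ st.2 ∨ (a ∈ L ∧ x < PySem.List.pyGetD xs a 0)) := by
  induction L with
  | nil => intro st a; simp
  | cons h t ih =>
    intro st a
    rw [List.foldl_cons]
    obtain ⟨ih1, ih2⟩ := ih (pvStepB xs x st h) a
    rw [ih1, ih2]
    clear ih1 ih2 ih
    unfold pvStepB
    by_cases hc : x > PySem.List.pyGetD xs h 0
    · rw [if_pos hc]
      simp only [PySem.Set.mem_add, List.mem_cons]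
      refine ⟨⟨?_, ?_⟩, ⟨?_, ?_⟩⟩
      · rintro ((hs | rfl) | ⟨ht, hx⟩)
        · exact Or.inl hs
        · exact Or.inr ⟨Or.inl rfl, hc⟩
        · exact Or.inr ⟨Or.inr ht, hx⟩
      · rintro (hs | ⟨(rfl | ht), hx⟩)
        · exact Or.inl (Or.inl hs)
        · exact Or.inl (Or.inr rfl)
        · exact Or.inr ⟨ht, hx⟩
      · rintro (hs | ⟨ht, hx⟩)
        · exact Or.inl hs
        · exact Or.inr ⟨Or.inr ht, hx⟩
      · rintro (hs | ⟨(rfl | ht), hx⟩)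
        · exact Or.inl hs
        · exact absurd hc (lt_asymm hx)
        · exact Or.inr ⟨ht, hx⟩
    · by_cases hc2 : x < PySem.List.pyGetD xs h 0
      · rw [if_neg hc, if_pos hc2]
        simp only [PySem.Set.mem_add, List.mem_cons]
        refine ⟨⟨?_, ?_⟩, ⟨?_, ?_⟩⟩
        · rintro (hs | ⟨ht, hx⟩)
          · exact Or.inl hs
          · exact Or.inr ⟨Or.inr ht, hx⟩
        · rintro (hs | ⟨(rfl | ht), hx⟩)
          · exact Or.inl hs
          · exact absurd hx hc
          · exact Or.inr ⟨ht, hx⟩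
        · rintro ((hs | rfl) | ⟨ht, hx⟩)
          · exact Or.inl hs
          · exact Or.inr ⟨Or.inl rfl, hc2⟩
          · exact Or.inr ⟨Or.inr ht, hx⟩
        · rintro (hs | ⟨(rfl | ht), hx⟩)
          · exact Or.inl (Or.inl hs)
          · exact Or.inl (Or.inr rfl)
          · exact Or.inr ⟨ht, hx⟩
      · rw [if_neg hc, if_neg hc2]
        simp only [List.mem_cons]
        refine ⟨⟨?_, ?_⟩, ⟨?_, ?_⟩⟩
        · rintro (hs | ⟨ht, hx⟩)
          · exact Or.inl hs
          · exact Or.inr ⟨Or.inr ht, hx⟩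
        · rintro (hs | ⟨(rfl | ht), hx⟩)
          · exact Or.inl hs
          · exact absurd hx hc
          · exact Or.inr ⟨ht, hx⟩
        · rintro (hs | ⟨ht, hx⟩)
          · exact Or.inl hs
          · exact Or.inr ⟨Or.inr ht, hx⟩
        · rintro (hs | ⟨(rfl | ht), hx⟩)
          · exact Or.inl hs
          · exact absurd hx hc2
          · exact Or.inr ⟨ht, hx⟩

-- membership after the whole veto pass
lemma mem_outer (xs : List Int) (n : Int) (J : List Int) :
    ∀ (st : PySem.Set Int × PySem.Set Int) (a : Int),
      (a ∈ (J.foldl (pvInnerB xs n) st).1 ↔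
        a ∈ st.1 ∨ ∃ j ∈ J, a ∈ PySem.List.pyRange (max 1 (j - 9)) (min (n - 1) (j + 11)) 1 ∧
          PySem.List.pyGetD xs j 0 > PySem.List.pyGetD xs a 0) ∧
      (a ∈ (J.foldl (pvInnerB xs n) st).2 ↔
        a ∈ st.2 ∨ ∃ j ∈ J, a ∈ PySem.List.pyRange (max 1 (j - 9)) (min (n - 1) (j + 11)) 1 ∧
          PySem.List.pyGetD xs j 0 < PySem.List.pyGetD xs a 0) := by
  induction J with
  | nil => intro st a; simp
  | cons h t ih =>
    intro st a
    rw [List.foldl_cons]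
    obtain ⟨ih1, ih2⟩ := ih (pvInnerB xs n st h) a
    obtain ⟨m1, m2⟩ := mem_inner xs (PySem.List.pyGetD xs h 0)
      (PySem.List.pyRange (max 1 (h - 9)) (min (n - 1) (h + 11)) 1) st a
    constructor
    · rw [ih1]
      unfold pvInnerB
      rw [m1]
      simp only [List.mem_cons]
      constructor
      · rintro ((hs | ⟨hr, hx⟩) | ⟨j, hj, hr, hx⟩)
        · exact Or.inl hs
        · exact Or.inr ⟨h, Or.inl rfl, hr, hx⟩
        · exact Or.inr ⟨j, Or.inr hj, hr, hx⟩
      · rintro (hs | ⟨j, (rfl | hj), hr, hx⟩)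
        · exact Or.inl (Or.inl hs)
        · exact Or.inl (Or.inr ⟨hr, hx⟩)
        · exact Or.inr ⟨j, hj, hr, hx⟩
    · rw [ih2]
      unfold pvInnerB
      rw [m2]
      simp only [List.mem_cons]
      constructor
      · rintro ((hs | ⟨hr, hx⟩) | ⟨j, hj, hr, hx⟩)
        · exact Or.inl hs
        · exact Or.inr ⟨h, Or.inl rfl, hr, hx⟩
        · exact Or.inr ⟨j, Or.inr hj, hr, hx⟩
      · rintro (hs | ⟨j, (rfl | hj), hr, hx⟩)
        · exact Or.inl (Or.inl hs)
        · exact Or.inl (Or.inr ⟨hr, hx⟩)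
        · exact Or.inr ⟨j, hj, hr, hx⟩

-- for an interior candidate i, the veto-set membership is exactly the negation of A's flag
lemma veto_iff (xs : List Int) (n i : Int) (hn : n = (xs.length : Int))
    (h1 : 1 ≤ i) (h2 : i < n - 1) :
    ((i ∈ ((PySem.List.pyRange 0 n 1).foldl (pvInnerB xs n)
        (PySem.Set.empty, PySem.Set.empty)).1 ↔
      ∃ j ∈ PySem.List.pyRange (max 0 (i-10)) (min n (i+10)) 1,
        PySem.List.pyGetD xs j 0 > PySem.List.pyGetD xs i 0) ∧
     (i ∈ ((PySem.List.pyRange 0 n 1).foldl (pvInnerB xs n)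
        (PySem.Set.empty, PySem.Set.empty)).2 ↔
      ∃ j ∈ PySem.List.pyRange (max 0 (i-10)) (min n (i+10)) 1,
        PySem.List.pyGetD xs j 0 < PySem.List.pyGetD xs i 0)) := by
  obtain ⟨o1, o2⟩ := mem_outer xs n (PySem.List.pyRange 0 n 1)
    (PySem.Set.empty, PySem.Set.empty) i
  constructor
  · rw [o1]
    simp only [PySem.Set.empty, List.not_mem_nil, false_or, PySem.List.mem_pyRange_one]
    constructor
    · rintro ⟨j, ⟨hj0, hjn⟩, ⟨hr1, hr2⟩, hx⟩
      exact ⟨j, ⟨by omega, by omega⟩, hx⟩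
    · rintro ⟨j, ⟨hj0, hjn⟩, hx⟩
      exact ⟨j, ⟨by omega, by omega⟩, ⟨by omega, by omega⟩, hx⟩
  · rw [o2]
    simp only [PySem.Set.empty, List.not_mem_nil, false_or, PySem.List.mem_pyRange_one]
    constructor
    · rintro ⟨j, ⟨hj0, hjn⟩, ⟨hr1, hr2⟩, hx⟩
      exact ⟨j, ⟨by omega, by omega⟩, hx⟩
    · rintro ⟨j, ⟨hj0, hjn⟩, hx⟩
      exact ⟨j, ⟨by omega, by omega⟩, ⟨by omega, by omega⟩, hx⟩

-- ===== VERDICT =====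
theorem get_new_turning_point_spec : Claim_equal_get_new_turning_point := by
  unfold Claim_equal_get_new_turning_point
  intro vp _
  unfold Spec_get_new_turning_point
  unfold get_new_turning_point get_new_turning_point_alt
  dsimp only
  refine PySem.List.foldl_congr_mem _ _ _ _ ?_
  intro acc i hmem
  rw [PySem.List.mem_pyRange_one] at hmem
  obtain ⟨hi1, hi2⟩ := hmem
  simp only [fst_pyGetD]
  set xs := vp.map Prod.fst with hxs
  have hn : ((vp.length : Int)) = (xs.length : Int) := by simp [hxs]
  obtain ⟨v1, v2⟩ := veto_iff xs (vp.length : Int) i hn hi1 hi2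
  set xi := PySem.List.pyGetD xs i 0 with hxi
  set T := (PySem.List.pyRange 0 (vp.length : Int) 1).foldl
      (pvInnerB xs (vp.length : Int)) (PySem.Set.empty, PySem.Set.empty) with hT
  have hflagmax :
      ((PySem.List.pyRange (max 0 (i-10)) (min (vp.length : Int) (i+10)) 1).foldl
        (fun b j => if PySem.List.pyGetD xs j 0 > xi then false else b) true) = true
      ↔ ¬ i ∈ T.1 := by
    rw [foldl_veto (fun j => PySem.List.pyGetD xs j 0 > xi), v1]
    simp [List.all_eq_true]
  have hflagmin :
      ((PySem.List.pyRange (max 0 (i-10)) (min (vp.length : Int) (i+10)) 1).foldl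
        (fun b j => if PySem.List.pyGetD xs j 0 < xi then false else b) true) = true
      ↔ ¬ i ∈ T.2 := by
    rw [foldl_veto (fun j => PySem.List.pyGetD xs j 0 < xi), v2]
    simp [List.all_eq_true]
  by_cases c1 : xi > PySem.List.pyGetD xs (i-1) 0 ∧ xi > PySem.List.pyGetD xs (i+1) 0
  · rw [if_pos c1]
    cases hf : ((PySem.List.pyRange (max 0 (i-10)) (min (vp.length : Int) (i+10)) 1).foldl
        (fun b j => if PySem.List.pyGetD xs j 0 > xi then false else b) true) with
    | true =>
      have hm : ¬ i ∈ T.1 := hflagmax.mp hf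
      rw [if_pos rfl, if_pos ⟨c1.1, c1.2, hm⟩]
    | false =>
      have hm : i ∈ T.1 := by
        by_contra hc
        rw [hflagmax.mpr hc] at hf
        simp at hf
      have hnot1 : ¬ (xi > PySem.List.pyGetD xs (i-1) 0 ∧
          xi > PySem.List.pyGetD xs (i+1) 0 ∧ ¬ i ∈ T.1) := fun h => h.2.2 hm
      have hnot2 : ¬ (xi < PySem.List.pyGetD xs (i-1) 0 ∧
          xi < PySem.List.pyGetD xs (i+1) 0 ∧ ¬ i ∈ T.2) :=
        fun h => absurd c1.1 (lt_asymm h.1)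
      rw [if_neg (Bool.false_ne_true), if_neg hnot1, if_neg hnot2]
  · rw [if_neg c1]
    have hnot1 : ¬ (xi > PySem.List.pyGetD xs (i-1) 0 ∧
        xi > PySem.List.pyGetD xs (i+1) 0 ∧ ¬ i ∈ T.1) := fun h => c1 ⟨h.1, h.2.1⟩
    rw [if_neg hnot1]
    by_cases c2 : xi < PySem.List.pyGetD xs (i-1) 0 ∧ xi < PySem.List.pyGetD xs (i+1) 0
    · rw [if_pos c2]
      cases hf : ((PySem.List.pyRange (max 0 (i-10)) (min (vp.length : Int) (i+10)) 1).foldl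
          (fun b j => if PySem.List.pyGetD xs j 0 < xi then false else b) true) with
      | true =>
        have hm : ¬ i ∈ T.2 := hflagmin.mp hf
        rw [if_pos rfl, if_pos ⟨c2.1, c2.2, hm⟩]
      | false =>
        have hm : i ∈ T.2 := by
          by_contra hc
          rw [hflagmin.mpr hc] at hf
          simp at hf
        have hnot2 : ¬ (xi < PySem.List.pyGetD xs (i-1) 0 ∧
            xi < PySem.List.pyGetD xs (i+1) 0 ∧ ¬ i ∈ T.2) := fun h => h.2.2 hm
        rw [if_neg (Bool.false_ne_true), if_neg hnot2]
    · have hnot2 : ¬ (xi < PySem.List.pyGetD xs (i-1) 0 ∧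
          xi < PySem.List.pyGetD xs (i+1) 0 ∧ ¬ i ∈ T.2) := fun h => c2 ⟨h.1, h.2.1⟩
      rw [if_neg c2, if_neg hnot2]
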